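-- pv_equiv track=rewrite | github.com/Krv-Analytics/Thema | thema/multiverse/universe/utils/starHelpers.py | mapper_unclustered_items
-- ===== SOURCE A (Python) =====
-- def mapper_unclustered_items(N, nodes):
--     """
--     Returns the list of items that were not clustered in the
--     mapper fitting.
--
--     Returns
--     -------
--     self._unclustered_item : list
--        A list of unclustered item ids
--     """
--     labels = dict()
--     unclustered_items = []
--     for idx in range(N):
--         place_holder = []
--         for node_id in nodes.keys():
--             if idx in nodes[node_id]:
--                 place_holder.append(node_id)
--
--         if len(place_holder) == 0:
--             place_holder = -1
--             unclustered_items.append(idx)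
--         labels[idx] = place_holder
--
--     return unclustered_items
-- ===== SOURCE B (Python) =====
-- def mapper_unclustered_items(N, nodes):
--     # Inverted nesting: collect every clustered item once, then one pass over range(N).
--     seen = set()
--     for members in nodes.values():
--         seen.update(members)
--     return [i for i in range(N) if i not in seen]
-- ===== Notes on version B (the rewrite author's own statement) =====
-- stated objective: faster
-- what changed: Inverts the loop nesting: instead of scanning every node's member list for each idx in range(N), B builds a 'seen' set once from all node member lists and then filters range(N) with O(1) membership tests, dropping the dead labels/place_holder scaffolding.
import Mathlib
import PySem

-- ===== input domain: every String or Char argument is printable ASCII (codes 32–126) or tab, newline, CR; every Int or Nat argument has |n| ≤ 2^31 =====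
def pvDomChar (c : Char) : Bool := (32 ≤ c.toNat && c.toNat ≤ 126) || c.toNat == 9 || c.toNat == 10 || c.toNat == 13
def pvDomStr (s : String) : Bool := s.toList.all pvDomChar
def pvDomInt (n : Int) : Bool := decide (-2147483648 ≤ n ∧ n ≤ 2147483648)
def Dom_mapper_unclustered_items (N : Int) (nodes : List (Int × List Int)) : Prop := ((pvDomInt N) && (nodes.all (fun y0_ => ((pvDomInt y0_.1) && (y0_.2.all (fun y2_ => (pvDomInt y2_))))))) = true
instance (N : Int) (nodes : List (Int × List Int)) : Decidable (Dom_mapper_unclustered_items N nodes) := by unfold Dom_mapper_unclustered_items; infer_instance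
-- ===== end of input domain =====

-- B inverts the loop nesting: one pass over nodes building a 'seen' set, then one filter of range(N);
-- it drops A's dead labels/place_holder scaffolding.

-- ===== PORT A =====
-- labels maps idx to either the list place_holder (Sum.inl) or -1 (Sum.inr), exactly as A reassigns place_holder.
def mapper_unclustered_items (N : Int) (nodes : List (Int × List Int)) : List Int :=
  let d := PySem.Dict.ofList nodes
  let st :=
    (PySem.List.pyRange 0 N 1).foldl
      (fun (st : PySem.Dict Int (List Int ⊕ Int) × List Int) idx =>
        let place_holder :=
          d.keys.foldl
            (fun ph node_id => if idx ∈ d.getD node_id [] then ph ++ [node_id] else ph) []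
        if place_holder = [] then (st.1.insert idx (Sum.inr (-1)), st.2 ++ [idx])
        else (st.1.insert idx (Sum.inl place_holder), st.2))
      (PySem.Dict.empty, [])
  st.2

-- ===== PORT B =====
def mapper_unclustered_items_alt (N : Int) (nodes : List (Int × List Int)) : List Int :=
  let seen :=
    (PySem.Dict.ofList nodes).values.foldl
      (fun (s : PySem.Set Int) members => PySem.Set.update s members) PySem.Set.empty
  (PySem.List.pyRange 0 N 1).filter (fun i => !(PySem.Set.contains seen i))

-- ===== PRECONDITION & SPEC =====
def Spec_mapper_unclustered_items (N : Int) (nodes : List (Int × List Int)) (out : List Int) : Prop := out = mapper_unclustered_items_alt N nodes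
instance (N : Int) (nodes : List (Int × List Int)) (out : List Int) : Decidable (Spec_mapper_unclustered_items N nodes out) := by unfold Spec_mapper_unclustered_items; infer_instance

-- ===== CLAIM (what is proved, stated in full; the proofs are below) =====
def Claim_equal_mapper_unclustered_items : Prop := ∀ (N : Int) (nodes : List (Int × List Int)), Dom_mapper_unclustered_items N nodes → Spec_mapper_unclustered_items N nodes (mapper_unclustered_items N nodes)

-- ===== LEMMAS AND PROOFS =====

-- A's output accumulator over any prefix: the foldl's second component is 'acc ++ filter'.
theorem pvA_foldl_snd (r : List Int)
    (step : (PySem.Dict Int (List Int ⊕ Int) × List Int) → Int → (PySem.Dict Int (List Int ⊕ Int) × List Int))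
    (p : Int → Bool)
    (hstep : ∀ st idx, (step st idx).2 = if p idx then st.2 ++ [idx] else st.2) :
    ∀ (st : PySem.Dict Int (List Int ⊕ Int) × List Int),
      (r.foldl step st).2 = st.2 ++ r.filter p := by
  induction r with
  | nil => intro st; simp
  | cons x xs ih =>
    intro st
    simp only [List.foldl_cons, List.filter_cons]
    rw [ih, hstep]
    by_cases h : p x = true <;> simp [h]

-- membership in the 'seen' set B builds
theorem pvSeen_mem (vss : List (List Int)) (y : Int) :
    ∀ (s : PySem.Set Int),
      (y ∈ vss.foldl (fun (s : PySem.Set Int) members => PySem.Set.update s members) s)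
        ↔ y ∈ s ∨ ∃ vs ∈ vss, y ∈ vs := by
  induction vss with
  | nil => intro s; simp
  | cons v vs ih =>
    intro s
    simp only [List.foldl_cons, ih, PySem.Set.mem_update]
    constructor
    · rintro ((h | h) | h)
      · exact Or.inl h
      · exact Or.inr ⟨v, by simp, h⟩
      · obtain ⟨w, hw, hy⟩ := h; exact Or.inr ⟨w, by simp [hw], hy⟩
    · rintro (h | ⟨w, hw, hy⟩)
      · exact Or.inl (Or.inl h)
      · rcases List.mem_cons.mp hw with rfl | hw
        · exact Or.inl (Or.inr hy)
        · exact Or.inr ⟨w, hw, hy⟩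

-- a value is in some d.values iff it is in d.getD k [] for some key k (keys nodup)
theorem pvValues_keys (d : PySem.Dict Int (List Int)) (hnd : d.keys.Nodup) (y : Int) :
    (∃ vs ∈ d.values, y ∈ vs) ↔ ∃ k ∈ d.keys, y ∈ d.getD k [] := by
  constructor
  · rintro ⟨vs, hvs, hy⟩
    simp only [PySem.Dict.values] at hvs
    obtain ⟨⟨k, v⟩, hp, hv⟩ := List.mem_map.mp hvs
    cases hv
    refine ⟨k, PySem.Dict.mem_keys_of_mem_items d hp, ?_⟩
    rw [PySem.Dict.getD_of_mem_items d hp hnd]; exact hy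
  · rintro ⟨k, hk, hy⟩
    simp only [PySem.Dict.keys] at hk
    obtain ⟨⟨k', v⟩, hp, hv⟩ := List.mem_map.mp hk
    cases hv
    rw [PySem.Dict.getD_of_mem_items d hp hnd] at hy
    exact ⟨v, List.mem_map.mpr ⟨(k', v), hp, rfl⟩, hy⟩

-- ===== VERDICT (by name: the statement is the Claim_ definition above) =====
theorem mapper_unclustered_items_spec : Claim_equal_mapper_unclustered_items := by
  intro N nodes _
  unfold Spec_mapper_unclustered_items mapper_unclustered_items mapper_unclustered_items_alt
  set d := PySem.Dict.ofList nodes with hd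
  simp only []
  rw [pvA_foldl_snd (PySem.List.pyRange 0 N 1) _
        (fun idx => decide ((d.keys.foldl
          (fun ph node_id => if idx ∈ d.getD node_id [] then ph ++ [node_id] else ph) []) = []))
        (by
          intro st idx
          by_cases h : (d.keys.foldl
            (fun ph node_id => if idx ∈ d.getD node_id [] then ph ++ [node_id] else ph) ([] : List Int)) = []
          · simp [h]
          · simp [h])]
  simp only [List.nil_append]
  apply List.filter_congr
  intro i _
  have hfil : (d.keys.foldl
      (fun ph node_id => if i ∈ d.getD node_id [] then ph ++ [node_id] else ph) ([] : List Int))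
      = d.keys.filter (fun node_id => decide (i ∈ d.getD node_id [])) := by
    have h := PySem.List.foldl_append_if
      (fun node_id => decide (i ∈ d.getD node_id [])) (fun x => x) d.keys []
    simpa using h
  have hsets : (i ∈ (d.values.foldl
      (fun (s : PySem.Set Int) members => PySem.Set.update s members) ([] : PySem.Set Int)))
      ↔ ∃ k ∈ d.keys, i ∈ d.getD k [] := by
    rw [pvSeen_mem]
    simp only [List.not_mem_nil, false_or]
    exact pvValues_keys d (PySem.Dict.nodup_keys_ofList nodes) i
  rw [hfil]
  by_cases h : ∃ k ∈ d.keys, i ∈ d.getD k []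
  · have h1 : d.keys.filter (fun node_id => decide (i ∈ d.getD node_id [])) ≠ [] := by
      obtain ⟨k, hk, hik⟩ := h
      simp only [ne_eq, List.filter_eq_nil_iff, decide_eq_true_eq, not_forall]
      push Not
      exact ⟨k, hk, hik⟩
    simp [h1]
    exact hsets.mpr h
  · have h1 : d.keys.filter (fun node_id => decide (i ∈ d.getD node_id [])) = [] := by
      rw [List.filter_eq_nil_iff]
      intro k hk
      simp only [decide_eq_true_eq]
      exact fun hik => h ⟨k, hk, hik⟩
    simp [h1]
    exact fun hm => h (hsets.mp hm)
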